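-- pv_equiv track=rewrite | github.com/kentblock/CSES-problems | searching_sorting/towers/towers.py | towers
-- ===== SOURCE A (Python) =====
-- def towers(cube_queue):
--     towers = []
--     for cube in cube_queue:
--         index = find_tower(towers, cube)
--         if index == -1:
--             towers.append(cube)
--         else:
--             towers[index] = cube
--     return len(towers)
--
-- def find_tower(towers, size):
--     if not towers or towers[-1] <= size:
--         return -1
--     s, e = 0, len(towers) - 1
--     while s < e:
--         mid = (s + e) // 2
--         if towers[mid] > size:
--             e = mid
--         else:
--             s = mid + 1
--     return s
-- ===== SOURCE B (Python) =====
-- def towers(cube_queue):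
--     towers = []
--     for cube in cube_queue:
--         for i, top in enumerate(towers):
--             if top > cube:
--                 towers[i] = cube
--                 break
--         else:
--             towers.append(cube)
--     return len(towers)
-- ===== Notes on version B (the rewrite author's own statement) =====
-- stated objective: simpler
-- what changed: The binary-search helper find_tower is removed entirely; B does one linear scan over the sorted tower tops and replaces the first top strictly greater than the cube (appending if none), which is the same index A's binary search finds.
import Mathlib
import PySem

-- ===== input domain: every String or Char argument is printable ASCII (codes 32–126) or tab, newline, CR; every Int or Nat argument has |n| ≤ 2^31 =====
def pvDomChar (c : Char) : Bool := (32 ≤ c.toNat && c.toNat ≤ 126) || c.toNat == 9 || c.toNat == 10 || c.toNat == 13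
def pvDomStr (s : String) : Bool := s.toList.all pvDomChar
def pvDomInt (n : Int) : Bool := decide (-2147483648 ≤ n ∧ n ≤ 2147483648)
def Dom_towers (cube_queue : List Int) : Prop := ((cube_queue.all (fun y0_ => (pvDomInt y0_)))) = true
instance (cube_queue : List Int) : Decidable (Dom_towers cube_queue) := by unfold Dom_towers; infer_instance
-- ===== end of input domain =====

-- B replaces A's binary-search helper by a single linear scan over the sorted tower tops (simpler, same greedy).

-- ===== PORT A =====
-- the while-loop of find_tower; indices are always in range, so pyGetD's default is never used
def findTowerLoop (t : List Int) (size s e : Int) : Int :=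
  if s < e then
    let mid := PySem.Int.floordiv (s + e) 2
    if PySem.List.pyGetD t mid 0 > size then
      findTowerLoop t size s mid
    else
      findTowerLoop t size (mid + 1) e
  else s
termination_by (e - s).toNat
decreasing_by
  · have h2 : PySem.Int.floordiv (s + e) 2 < e := by
      rw [PySem.Int.floordiv_lt_iff_lt_mul (by omega)]; omega
    omega
  · have h := PySem.Int.floordiv_two_mid_bounds (le_of_lt ‹s < e›)
    omega

def findTower (t : List Int) (size : Int) : Int :=
  if t = [] ∨ PySem.List.pyGetD t (-1) 0 ≤ size then -1
  else findTowerLoop t size 0 ((t.length : Int) - 1)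

def towersStepA (acc : List Int) (cube : Int) : List Int :=
  let index := findTower acc cube
  if index = -1 then acc ++ [cube]
  else PySem.List.pySetD acc index cube

def towers (cube_queue : List Int) : Int :=
  ((cube_queue.foldl towersStepA []).length : Int)

-- ===== PORT B =====
-- the inner for/break/else scan of Source B as a structural recursion
def replaceFirst (ts : List Int) (cube : Int) : List Int :=
  match ts with
  | [] => [cube]
  | t :: rest => if t > cube then cube :: rest else t :: replaceFirst rest cube

def towers_alt (cube_queue : List Int) : Int :=
  ((cube_queue.foldl replaceFirst []).length : Int)

-- ===== PRECONDITION & SPEC =====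
def Spec_towers (cube_queue : List Int) (out : Int) : Prop := out = towers_alt cube_queue
instance (cube_queue : List Int) (out : Int) : Decidable (Spec_towers cube_queue out) := by unfold Spec_towers; infer_instance

-- ===== CLAIM (what is proved, stated in full; the proofs are below) =====
def Claim_equal_towers : Prop := ∀ (cube_queue : List Int), Dom_towers cube_queue → Spec_towers cube_queue (towers cube_queue)

-- ===== LEMMAS AND PROOFS =====

theorem mem_replaceFirst {ts : List Int} {c x : Int} (h : x ∈ replaceFirst ts c) :
    x = c ∨ x ∈ ts := by
  induction ts with
  | nil => simp [replaceFirst] at h; simp [h]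
  | cons t rest ih =>
    simp only [replaceFirst] at h
    split at h
    · rcases List.mem_cons.1 h with h | h
      · exact Or.inl h
      · exact Or.inr (List.mem_cons_of_mem _ h)
    · rcases List.mem_cons.1 h with h | h
      · exact Or.inr (by simp [h])
      · rcases ih h with h | h
        · exact Or.inl h
        · exact Or.inr (List.mem_cons_of_mem _ h)

theorem sorted_replaceFirst {ts : List Int} {c : Int}
    (h : List.Pairwise (· ≤ ·) ts) : List.Pairwise (· ≤ ·) (replaceFirst ts c) := by
  induction ts with
  | nil => simp [replaceFirst]
  | cons t rest ih =>
    rw [List.pairwise_cons] at h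
    simp only [replaceFirst]
    split
    · rw [List.pairwise_cons]
      exact ⟨fun x hx => le_trans (le_of_lt ‹t > c›) (h.1 x hx), h.2⟩
    · rw [List.pairwise_cons]
      refine ⟨fun x hx => ?_, ih h.2⟩
      rcases mem_replaceFirst hx with rfl | hx
      · omega
      · exact h.1 x hx

theorem replaceFirst_all_le {ts : List Int} {c : Int}
    (h : ∀ x ∈ ts, x ≤ c) : replaceFirst ts c = ts ++ [c] := by
  induction ts with
  | nil => simp [replaceFirst]
  | cons t rest ih =>
    simp only [replaceFirst]
    have ht : t ≤ c := h t (by simp)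
    rw [if_neg (by omega), ih (fun x hx => h x (List.mem_cons_of_mem _ hx))]
    simp

theorem replaceFirst_eq_set {ts : List Int} {c : Int} (j : Nat)
    (hj : j < ts.length) (hgt : c < ts[j])
    (hle : ∀ i (h : i < j), ts[i]'(by omega) ≤ c) :
    replaceFirst ts c = ts.set j c := by
  induction ts generalizing j with
  | nil => simp at hj
  | cons t rest ih =>
    cases j with
    | zero =>
      simp only [List.getElem_cons_zero] at hgt
      simp [replaceFirst, hgt]
    | succ k =>
      have h0 : t ≤ c := hle 0 (by omega)
      simp only [replaceFirst, if_neg (by omega : ¬ t > c), List.set_cons_succ]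
      congr 1
      exact ih k (by simpa using hj) (by simpa using hgt)
        (fun i hi => by simpa using hle (i + 1) (by omega))

theorem pyGetD_mono (t : List Int) (hsort : List.Pairwise (· ≤ ·) t) {i j : Int}
    (h0 : 0 ≤ i) (hij : i ≤ j) (hj : j < (t.length : Int)) :
    PySem.List.pyGetD t i 0 ≤ PySem.List.pyGetD t j 0 := by
  rw [PySem.List.pyGetD_eq_getElem t 0 h0 (by omega), PySem.List.pyGetD_eq_getElem t 0 (by omega) hj]
  rcases eq_or_lt_of_le hij with rfl | hlt
  · exact le_refl _
  · exact List.pairwise_iff_getElem.1 hsort i.toNat j.toNat (by omega) (by omega) (by omega)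

theorem findTowerLoop_spec (t : List Int) (size : Int)
    (hsort : List.Pairwise (· ≤ ·) t) :
    ∀ (n : Nat) (s e : Int), (e - s).toNat = n → 0 ≤ s → s ≤ e → e < (t.length : Int) →
    (∀ i : Int, 0 ≤ i → i < s → PySem.List.pyGetD t i 0 ≤ size) →
    size < PySem.List.pyGetD t e 0 →
    s ≤ findTowerLoop t size s e ∧ findTowerLoop t size s e ≤ e ∧
      size < PySem.List.pyGetD t (findTowerLoop t size s e) 0 ∧
      ∀ i : Int, 0 ≤ i → i < findTowerLoop t size s e → PySem.List.pyGetD t i 0 ≤ size := by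
  intro n
  induction n using Nat.strong_induction_on with
  | _ n ih =>
    intro s e hn hs hse he hlow hhigh
    rw [findTowerLoop]
    by_cases h : s < e
    · have hb := PySem.Int.floordiv_two_mid_bounds (le_of_lt h)
      have h2 : PySem.Int.floordiv (s + e) 2 < e := by
        rw [PySem.Int.floordiv_lt_iff_lt_mul (by omega)]; omega
      set mid := PySem.Int.floordiv (s + e) 2 with hmid
      simp only [if_pos h]
      by_cases hg : PySem.List.pyGetD t mid 0 > size
      · simp only [if_pos hg]
        have r := ih ((mid - s).toNat) (by omega) s mid rfl hs (by omega) (by omega) hlow hg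
        exact ⟨r.1, by omega, r.2.2⟩
      · simp only [if_neg hg]
        push_neg at hg
        have hlow' : ∀ i : Int, 0 ≤ i → i < mid + 1 → PySem.List.pyGetD t i 0 ≤ size := by
          intro i hi hi'
          by_cases hlt : i < s
          · exact hlow i hi hlt
          · exact le_trans (pyGetD_mono t hsort hi (by omega) (by omega)) hg
        have r := ih ((e - (mid + 1)).toNat) (by omega) (mid + 1) e rfl (by omega) (by omega) he hlow' hhigh
        exact ⟨by omega, r.2.1, r.2.2⟩
    · simp only [if_neg h]
      have : s = e := by omega
      subst this
      exact ⟨le_refl _, le_refl _, hhigh, hlow⟩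

theorem sorted_le_getLast : ∀ (ts : List Int), List.Pairwise (· ≤ ·) ts →
    ∀ x ∈ ts, ∀ hne : ts ≠ [], x ≤ ts.getLast hne := by
  intro ts
  induction ts with
  | nil => intro _ x hx; simp at hx
  | cons t rest ih =>
    intro h x hx hne
    rw [List.pairwise_cons] at h
    cases rest with
    | nil => have : x = t := by simpa using hx
             simp [this]
    | cons u rs =>
      rw [List.getLast_cons (by simp)]
      rcases List.mem_cons.1 hx with rfl | hx
      · exact le_trans (h.1 u (by simp)) (ih h.2 u (by simp) (by simp))
      · exact ih h.2 x hx (by simp)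

theorem step_eq {acc : List Int} (cube : Int) (h : List.Pairwise (· ≤ ·) acc) :
    towersStepA acc cube = replaceFirst acc cube := by
  unfold towersStepA findTower
  by_cases hemp : acc = []
  · subst hemp
    simp [replaceFirst]
  · by_cases hlast : PySem.List.pyGetD acc (-1) 0 ≤ cube
    · rw [if_pos (Or.inr hlast), if_pos rfl]
      rw [PySem.List.pyGetD_neg_one acc 0 hemp] at hlast
      rw [replaceFirst_all_le
        (fun x hx => le_trans (sorted_le_getLast acc h x hx hemp) hlast)]
    · have hP : ¬(acc = [] ∨ PySem.List.pyGetD acc (-1) 0 ≤ cube) := not_or.mpr ⟨hemp, hlast⟩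
      rw [if_neg hP]
      push_neg at hlast
      have hlen : 0 < acc.length := List.length_pos_iff.mpr hemp
      have hidx : ((acc.length : Int) - 1).toNat = acc.length - 1 := by omega
      have hhigh : cube < PySem.List.pyGetD acc ((acc.length : Int) - 1) 0 := by
        rw [PySem.List.pyGetD_neg_one acc 0 hemp, List.getLast_eq_getElem] at hlast
        rw [PySem.List.pyGetD_eq_getElem acc 0 (by omega) (by omega)]
        simp only [hidx]
        exact hlast
      obtain ⟨h1, h2, h3, h4⟩ := findTowerLoop_spec acc cube h
        ((((acc.length : Int) - 1) - 0).toNat) 0 ((acc.length : Int) - 1) rfl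
        (by omega) (by omega) (by omega) (by intro i hi hneg; omega) hhigh
      set r := findTowerLoop acc cube 0 ((acc.length : Int) - 1) with hr
      have hrne : ¬(r = -1) := by omega
      rw [if_neg hrne]
      rw [PySem.List.pySetD_of_nonneg acc cube h1]
      refine (replaceFirst_eq_set r.toNat (by omega) ?_ ?_).symm
      · have := h3
        rwa [PySem.List.pyGetD_eq_getElem acc 0 h1 (by omega)] at this
      · intro i hi
        have := h4 (i : Int) (by omega) (by omega)
        rw [PySem.List.pyGetD_eq_getElem acc 0 (by omega) (by omega)] at this
        simpa using this

theorem foldl_eq (q : List Int) : ∀ acc : List Int, List.Pairwise (· ≤ ·) acc →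
    q.foldl towersStepA acc = q.foldl replaceFirst acc := by
  induction q with
  | nil => intro acc _; rfl
  | cons c rest ih =>
    intro acc hs
    simp only [List.foldl_cons]
    rw [step_eq c hs]
    exact ih _ (sorted_replaceFirst hs)

-- ===== VERDICT (by name: the statement is the Claim_ definition above) =====
theorem towers_spec : Claim_equal_towers := by
  intro q _
  unfold Spec_towers towers towers_alt
  rw [foldl_eq q [] (by simp)]
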